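-- pv_equiv track=rewrite | github.com/Klodi1379/legal_case_management | core/middleware.py | _path_matches
-- ===== SOURCE A (Python) =====
-- def _path_matches(actual_path, pattern):
--     """Check if a path matches a pattern with wildcards."""
--     if '*' not in pattern:
--         return actual_path == pattern
--
--     parts = pattern.split('/')
--     actual_parts = actual_path.split('/')
--
--     if len(parts) != len(actual_parts):
--         return False
--
--     for i, part in enumerate(parts):
--         if part == '*':
--             continue
--         if part != actual_parts[i]:
--             return False
--
--     return True
-- ===== SOURCE B (Python) =====
-- def _path_matches(actual_path, pattern):
--     """Segment-recursive matcher: peel one path segment at a time with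
--     str.partition, no split lists, no length precheck, no wildcard fast path."""
--     pseg, psep, prest = pattern.partition('/')
--     aseg, asep, arest = actual_path.partition('/')
--     if pseg != '*' and pseg != aseg:
--         return False
--     if psep != asep:
--         return False
--     if not psep:
--         return True
--     return _path_matches(arest, prest)
-- ===== Notes on version B (the rewrite author's own statement) =====
-- stated objective: alternative
-- what changed: Replaces the no-wildcard fast path plus split/length-check/indexed loop with a single recursive matcher that peels one segment at a time via str.partition and never builds the split lists.
import Mathlib
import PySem

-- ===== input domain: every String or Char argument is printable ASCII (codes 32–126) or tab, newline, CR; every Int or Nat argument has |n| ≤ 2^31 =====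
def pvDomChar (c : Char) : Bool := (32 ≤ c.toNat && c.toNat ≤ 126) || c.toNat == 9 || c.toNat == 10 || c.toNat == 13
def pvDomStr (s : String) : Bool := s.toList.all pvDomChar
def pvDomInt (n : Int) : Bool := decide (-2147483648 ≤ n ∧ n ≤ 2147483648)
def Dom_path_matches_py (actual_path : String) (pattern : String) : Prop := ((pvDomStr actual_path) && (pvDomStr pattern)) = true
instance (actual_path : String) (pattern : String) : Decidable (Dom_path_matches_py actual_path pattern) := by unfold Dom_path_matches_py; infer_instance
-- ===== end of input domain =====

-- B replaces A's fast path + split/length-check/indexed loop with one recursive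
-- matcher peeling a segment at a time (str.partition); same return value everywhere.

-- ===== PORT A =====
-- the 'for i, part in enumerate(parts): …' loop with continue / early return False
def pmLoopA (aparts : List (List Char)) (i : Int) : List (List Char) → Bool
  | [] => true
  | part :: rest =>
    if part == ['*'] then pmLoopA aparts (i + 1) rest
    else if part != PySem.List.pyGetD aparts i [] then false
    else pmLoopA aparts (i + 1) rest

def path_matches_py (actual_path : String) (pattern : String) : Bool :=
  if !(PySem.Str.isIn "*" pattern) then actual_path == pattern
  else
    let parts := PySem.Chars.splitOn pattern.toList ['/']
    let actual_parts := PySem.Chars.splitOn actual_path.toList ['/']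
    if parts.length != actual_parts.length then false
    else pmLoopA actual_parts 0 parts

-- ===== PORT B =====
-- Source B's recursive matcher; str.partition('/') is ported exactly by hand as
-- takeWhile/dropWhile at the first '/': pseg = chars before the first '/',
-- dropWhile = the separator followed by the remainder ([] when '/' is absent),
-- so 'psep != asep' / 'not psep' / the two remainders become the match below.
def pmNotSlash (c : Char) : Bool := c ≠ '/'

def pmGoB (a p : List Char) : Bool :=
  -- pseg/aseg = partition('/')[0];  dropWhile pmNotSlash = sep ++ remainder ([] iff no '/')
  if p.takeWhile pmNotSlash ≠ ['*'] ∧ p.takeWhile pmNotSlash ≠ a.takeWhile pmNotSlash then false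
  else if hp : (p.dropWhile pmNotSlash).isEmpty then (a.dropWhile pmNotSlash).isEmpty
  else if (a.dropWhile pmNotSlash).isEmpty then false
  else pmGoB (a.dropWhile pmNotSlash).tail (p.dropWhile pmNotSlash).tail
termination_by p.length
decreasing_by
  have h1 : (p.dropWhile pmNotSlash).length ≤ p.length := List.length_dropWhile_le _ _
  have h2 : (p.dropWhile pmNotSlash) ≠ [] := by simpa using hp
  have h3 := List.length_pos_of_ne_nil h2
  rw [List.length_tail]; omega

def path_matches_py_alt (actual_path : String) (pattern : String) : Bool :=
  pmGoB actual_path.toList pattern.toList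

-- ===== PRECONDITION & SPEC =====
def Spec_path_matches_py (actual_path : String) (pattern : String) (out : Bool) : Prop := out = path_matches_py_alt actual_path pattern
instance (actual_path : String) (pattern : String) (out : Bool) : Decidable (Spec_path_matches_py actual_path pattern out) := by unfold Spec_path_matches_py; infer_instance

-- ===== CLAIM (what is proved, stated in full; the proofs are below) =====
def Claim_equal_path_matches_py : Prop := ∀ (actual_path : String) (pattern : String), Dom_path_matches_py actual_path pattern → Spec_path_matches_py actual_path pattern (path_matches_py actual_path pattern)

-- ===== LEMMAS AND PROOFS =====

-- structural single-char split (reference model for Chars.splitOn s ['/'])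
def pmSplit (cur : List Char) : List Char → List (List Char)
  | [] => [cur.reverse]
  | c :: r => if c = '/' then cur.reverse :: pmSplit [] r else pmSplit (c :: cur) r

-- segment-wise matcher (reference model both ports are reduced to)
def pmSeg : List (List Char) → List (List Char) → Bool
  | [], [] => true
  | a0 :: at_, p0 :: pt => (p0 == ['*'] || p0 == a0) && pmSeg at_ pt
  | _, _ => false

-- the tail of pmSplit [] l after its first segment
def pmTail (l : List Char) : List (List Char) :=
  match l.dropWhile pmNotSlash with
  | [] => [] | _ :: r => pmSplit [] r

lemma pmTail_nil (l : List Char) (h : l.dropWhile pmNotSlash = []) : pmTail l = [] := by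
  unfold pmTail; rw [h]

lemma pmTail_cons (l : List Char) {x : Char} {r : List Char}
    (h : l.dropWhile pmNotSlash = x :: r) : pmTail l = pmSplit [] r := by
  unfold pmTail; rw [h]

lemma pmSplit_ne_nil (cur l) : pmSplit cur l ≠ [] := by
  induction l generalizing cur with
  | nil => simp [pmSplit]
  | cons c r ih =>
    by_cases h : c = '/'
    · simp [pmSplit, h]
    · simp only [pmSplit, if_neg h]
      exact ih _

lemma pmSplit_go (fuel : Nat) :
    ∀ (l cur : List Char) (acc : List (List Char)), l.length ≤ fuel →
      PySem.Chars.splitOn.go ['/'] fuel l cur acc = acc.reverse ++ pmSplit cur l := by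
  induction fuel with
  | zero =>
    intro l cur acc h
    have : l = [] := by cases l <;> simp_all
    subst this; simp [PySem.Chars.splitOn.go, pmSplit]
  | succ n ih =>
    intro l cur acc h
    cases l with
    | nil => simp [PySem.Chars.splitOn.go, pmSplit]
    | cons c r =>
      by_cases hc : c = '/'
      · subst hc
        have hpre : List.isPrefixOf ['/'] ('/' :: r) = true := by simp [List.isPrefixOf]
        simp only [PySem.Chars.splitOn.go, hpre, if_pos]
        rw [show List.drop ['/'].length ('/' :: r) = r from rfl]
        rw [ih r [] (cur.reverse :: acc) (by simpa using Nat.le_of_succ_le_succ h)]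
        simp [pmSplit]
      · have hpre : List.isPrefixOf ['/'] (c :: r) = false := by
          simp [List.isPrefixOf]; exact fun h => absurd h.symm hc
        simp only [PySem.Chars.splitOn.go, hpre]
        rw [ih r (c :: cur) acc (by simpa using Nat.le_of_succ_le_succ h)]
        simp [pmSplit, hc]

lemma splitOn_eq_pmSplit (s : List Char) :
    PySem.Chars.splitOn s ['/'] = pmSplit [] s := by
  unfold PySem.Chars.splitOn
  rw [pmSplit_go (s.length + 1) s [] [] (by omega)]
  simp

lemma pmSplit_eq (cur l) :
    pmSplit cur l = (cur.reverse ++ l.takeWhile pmNotSlash) ::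
      (match l.dropWhile pmNotSlash with
       | [] => [] | _ :: r => pmSplit [] r) := by
  induction l generalizing cur with
  | nil => simp [pmSplit]
  | cons c r ih =>
    by_cases h : c = '/'
    · subst h; simp [pmSplit, pmNotSlash]
    · simp [pmSplit, pmNotSlash, h, ih (c :: cur)]

lemma pmSplit_nil_eq (l : List Char) :
    pmSplit [] l = l.takeWhile pmNotSlash :: pmTail l := by
  rw [pmSplit_eq]; unfold pmTail; simp

-- join ∘ split = id, for injectivity of the split
def pmJoin : List (List Char) → List Char
  | [] => []
  | [s] => s
  | s :: rest => s ++ '/' :: pmJoin rest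

lemma pmJoin_pmSplit (l cur) : pmJoin (pmSplit cur l) = cur.reverse ++ l := by
  induction l generalizing cur with
  | nil => simp [pmSplit, pmJoin]
  | cons c r ih =>
    by_cases h : c = '/'
    · subst h
      have hne := pmSplit_ne_nil [] r
      cases hsp : pmSplit [] r with
      | nil => exact absurd hsp hne
      | cons s ss =>
        have := ih ([] : List Char)
        rw [hsp] at this
        simp [pmSplit, pmJoin, hsp, this]
    · simp [pmSplit, h, ih (c :: cur)]

lemma pmSplit_inj {a p : List Char} (h : pmSplit [] a = pmSplit [] p) : a = p := by
  have h2 := pmJoin_pmSplit a []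
  rw [h, pmJoin_pmSplit p []] at h2
  simpa using h2.symm

-- no '*' char in l → no segment of its split is ["*"]
lemma pmSplit_no_star {l cur : List Char} (hl : '*' ∉ l) (hc : '*' ∉ cur) :
    ∀ s ∈ pmSplit cur l, s ≠ ['*'] := by
  induction l generalizing cur with
  | nil =>
    intro s hs
    simp [pmSplit] at hs; subst hs
    intro h
    exact hc (by rw [← List.mem_reverse, h]; simp)
  | cons c r ih =>
    intro s hs
    have hl2 : '*' ∉ r := fun hm => hl (by simp [hm])
    by_cases h : c = '/'
    · subst h; simp [pmSplit] at hs
      rcases hs with hs | hs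
      · subst hs; intro h; exact hc (by rw [← List.mem_reverse, h]; simp)
      · exact ih hl2 (by simp) s hs
    · simp [pmSplit, h] at hs
      have hlc : '*' ≠ c := fun he => hl (List.mem_cons.mpr (Or.inl he))
      refine ih hl2 ?_ s hs
      intro hm
      rcases List.mem_cons.mp hm with h' | h'
      · exact hlc h'
      · exact hc h'

lemma pmSeg_no_star : ∀ (ps as : List (List Char)), (∀ s ∈ ps, s ≠ ['*']) →
    pmSeg as ps = (as == ps) := by
  intro ps
  induction ps with
  | nil => intro as _; cases as <;> simp [pmSeg]
  | cons p0 pt ih =>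
    intro as h
    cases as with
    | nil => simp [pmSeg]
    | cons a0 at_ =>
      have h0 : (p0 == ['*']) = false := by
        simpa using h p0 (by simp)
      rw [show pmSeg (a0 :: at_) (p0 :: pt) = ((p0 == ['*'] || p0 == a0) && pmSeg at_ pt) from rfl]
      rw [ih at_ (fun s hs => h s (by simp [hs]))]
      have hco : (p0 == a0) = (a0 == p0) := by
        by_cases h' : p0 = a0
        · simp [h']
        · have h'' : a0 ≠ p0 := fun e => h' e.symm
          simp [h', h'']
      rw [h0, hco]
      simp [List.cons_beq_cons]

-- pmSeg fails on length mismatch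
lemma pmSeg_length_ne : ∀ (as ps : List (List Char)), as.length ≠ ps.length →
    pmSeg as ps = false := by
  intro as
  induction as with
  | nil => intro ps h; cases ps <;> simp_all [pmSeg]
  | cons a0 at_ ih =>
    intro ps h
    cases ps with
    | nil => simp [pmSeg]
    | cons p0 pt => simp [pmSeg, ih pt (by simp at h; omega)]

-- A's loop equals pmSeg when the lengths agree
lemma pmLoopA_eq : ∀ (ps : List (List Char)) (as : List (List Char)) (k : Nat),
    (as.drop k).length = ps.length →
    pmLoopA as (k : Int) ps = pmSeg (as.drop k) ps := by
  intro ps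
  induction ps with
  | nil => intro as k h; simp [pmLoopA, pmSeg, List.length_eq_zero_iff.mp h]
  | cons p0 pt ih =>
    intro as k h
    have hk : k < as.length := by
      by_contra hk
      rw [List.drop_eq_nil_of_le (by omega)] at h; simp at h
    have hdrop : as.drop k = as[k] :: as.drop (k + 1) := List.drop_eq_getElem_cons hk
    have hget : PySem.List.pyGetD as (k : Int) [] = as[k] := by
      rw [PySem.List.pyGetD_natCast]; simp [hk]
    have hlen : (as.drop (k + 1)).length = pt.length := by
      rw [hdrop] at h; simp at h ⊢; omega
    have hrec : pmLoopA as ((k : Int) + 1) pt = pmSeg (as.drop (k + 1)) pt := by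
      have := ih as (k + 1) hlen
      simpa [Int.natCast_add] using this
    rw [hdrop]
    by_cases hstar : p0 = ['*']
    · simp [pmLoopA, pmSeg, hstar, hrec]
    · by_cases heq : p0 = as[k]
      · simp [pmLoopA, pmSeg, heq, hget, hrec]
      · simp [pmLoopA, pmSeg, hstar, heq, hget]

-- B's recursion equals pmSeg over the splits
lemma pmGoB_eq_aux (n : Nat) : ∀ (p : List Char), p.length ≤ n → ∀ a,
    pmGoB a p = pmSeg (pmSplit [] a) (pmSplit [] p) := by
  induction n using Nat.strong_induction_on with
  | _ n ih =>
    intro p hp a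
    rw [pmGoB, pmSplit_nil_eq a, pmSplit_nil_eq p]
    rw [show pmSeg (a.takeWhile pmNotSlash :: pmTail a) (p.takeWhile pmNotSlash :: pmTail p) =
        ((p.takeWhile pmNotSlash == ['*'] || p.takeWhile pmNotSlash == a.takeWhile pmNotSlash) &&
          pmSeg (pmTail a) (pmTail p)) from rfl]
    by_cases hg : p.takeWhile pmNotSlash ≠ ['*'] ∧
        p.takeWhile pmNotSlash ≠ a.takeWhile pmNotSlash
    · rw [if_pos hg]
      have e1 : (p.takeWhile pmNotSlash == ['*']) = false := by simp [hg.1]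
      have e2 : (p.takeWhile pmNotSlash == a.takeWhile pmNotSlash) = false := by simp [hg.2]
      rw [e1, e2]
      simp
    · rw [if_neg hg]
      have hcond : (p.takeWhile pmNotSlash == ['*'] ||
          p.takeWhile pmNotSlash == a.takeWhile pmNotSlash) = true := by
        rcases not_and_or.mp hg with h | h
        · simp at h; simp [h]
        · simp at h; simp [h]
      rw [hcond, Bool.true_and]
      cases hdp : p.dropWhile pmNotSlash with
      | nil =>
        rw [pmTail_nil p hdp]
        cases hda : a.dropWhile pmNotSlash with
        | nil => rw [pmTail_nil a hda]; simp [pmSeg]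
        | cons x xs =>
          rw [pmTail_cons a hda]
          obtain ⟨s, ss, hsp⟩ := List.exists_cons_of_ne_nil (pmSplit_ne_nil [] xs)
          rw [hsp]
          simp [pmSeg]
      | cons y ys =>
        rw [pmTail_cons p hdp]
        cases hda : a.dropWhile pmNotSlash with
        | nil =>
          rw [pmTail_nil a hda]
          obtain ⟨s, ss, hsp⟩ := List.exists_cons_of_ne_nil (pmSplit_ne_nil [] ys)
          rw [hsp]
          simp [pmSeg]
        | cons x xs =>
          rw [pmTail_cons a hda]
          have h1 : (p.dropWhile pmNotSlash).length ≤ p.length :=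
            List.length_dropWhile_le _ _
          rw [hdp] at h1
          have hys : ys.length ≤ n - 1 := by simp at h1; omega
          have hn : n - 1 < n := by simp at h1; omega
          have hrec := ih (n - 1) hn ys hys xs
          simpa using hrec

lemma pmGoB_eq (p a : List Char) : pmGoB a p = pmSeg (pmSplit [] a) (pmSplit [] p) :=
  pmGoB_eq_aux p.length p le_rfl a

lemma mem_singleton_infix {c : Char} {l : List Char} : [c] <:+: l ↔ c ∈ l := by
  constructor
  · intro h; exact h.mem (by simp)
  · intro h
    rcases List.append_of_mem h with ⟨s, t, rfl⟩
    exact ⟨s, t, by simp⟩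

lemma star_not_mem_of_isIn_false {p : String}
    (h : PySem.Str.isIn "*" p = false) : '*' ∉ p.toList := by
  intro hmem
  rw [PySem.Str.isIn_eq] at h
  unfold PySem.Chars.isIn at h
  simp at h
  rw [PySem.Chars.find_eq_neg_one_iff] at h
  exact h (mem_singleton_infix.mpr (by simpa using hmem))

lemma main_eq (a p : String) :
    path_matches_py a p = pmSeg (pmSplit [] a.toList) (pmSplit [] p.toList) := by
  unfold path_matches_py
  by_cases h : PySem.Str.isIn "*" p = false
  · rw [h]
    simp only [Bool.not_false, if_true]
    have hstar := star_not_mem_of_isIn_false h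
    rw [pmSeg_no_star _ _ (pmSplit_no_star hstar (by simp))]
    by_cases he : a = p
    · subst he; simp
    · have hne : pmSplit [] a.toList ≠ pmSplit [] p.toList := by
        intro hc
        exact he (String.ext (pmSplit_inj hc))
      simp [he, hne]
  · have ht : PySem.Str.isIn "*" p = true := by simpa using h
    rw [ht]
    simp only [Bool.not_true]
    rw [splitOn_eq_pmSplit, splitOn_eq_pmSplit]
    by_cases hlen : (pmSplit [] p.toList).length = (pmSplit [] a.toList).length
    · have hloop := pmLoopA_eq (pmSplit [] p.toList) (pmSplit [] a.toList) 0
        (by simpa using hlen.symm)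
      simp only [hlen, bne_self_eq_false]
      simpa using hloop
    · have hfalse := pmSeg_length_ne (pmSplit [] a.toList) (pmSplit [] p.toList)
        (fun hc => hlen hc.symm)
      simp [hlen, hfalse]

-- ===== VERDICT (by name: the statement is the Claim_ definition above) =====
theorem path_matches_py_spec : Claim_equal_path_matches_py := by
  intro a p _
  show path_matches_py a p = path_matches_py_alt a p
  rw [main_eq, path_matches_py_alt, pmGoB_eq]
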